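-- pv_equiv track=rewrite | github.com/GustaEnge/onlineJudges | triangle.py | check_triangle
-- ===== SOURCE A (Python) =====
-- def check_triangle(args):
--     cond_three = False
--     triangle = "N"
--     a=b=c=0
--     while not cond_three:
--         args.sort(reverse=True)
--         highest = args[0]
--         args.remove(highest)
--         if len(args) >= 2:
--             b,c = int(args[0]), int(args[1])
--             a = highest
--             if b+c>a :
--                 triangle = "S"
--                 cond_three = True
--         else:
--             cond_three = True
--     return triangle
-- ===== SOURCE B (Python) =====
-- def check_triangle(args):
--     s = sorted(args, reverse=True)
--     for a, b, c in zip(s, s[1:], s[2:]):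
--         if b + c > a:
--             return "S"
--     return "N"
-- ===== Notes on version B (the rewrite author's own statement) =====
-- stated objective: alternative
-- what changed: B sorts the list once descending and does a single linear scan of consecutive triples, instead of A's loop that re-sorts and removes the maximum on every iteration.
-- outside the precondition, e.g. on check_triangle([]): A raises IndexError, B returns 'N'
import Mathlib
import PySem

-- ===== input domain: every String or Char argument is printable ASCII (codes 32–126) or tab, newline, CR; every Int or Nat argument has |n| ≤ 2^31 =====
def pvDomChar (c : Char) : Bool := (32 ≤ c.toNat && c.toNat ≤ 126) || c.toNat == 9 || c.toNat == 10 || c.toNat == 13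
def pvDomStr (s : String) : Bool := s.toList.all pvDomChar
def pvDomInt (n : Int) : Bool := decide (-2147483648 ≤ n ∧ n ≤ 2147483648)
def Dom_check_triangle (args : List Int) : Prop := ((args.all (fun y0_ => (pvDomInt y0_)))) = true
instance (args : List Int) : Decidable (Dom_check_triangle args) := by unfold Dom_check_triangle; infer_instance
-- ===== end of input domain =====

-- B sorts once descending and scans consecutive triples, instead of A's loop that
-- re-sorts and removes the maximum each iteration. Return values proved equal on
-- nonempty lists; A mutates its argument list in place (sorts and empties it) while
-- B does not — the equivalence proved here is about the return value only.

-- ===== PORT A =====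
-- A's while loop: each iteration sorts args descending, pops the head, and checks the
-- two new top elements; stops with "S" on success or "N" when fewer than 2 remain.
def check_triangle_go (args : List Int) : String :=
  let s := PySem.List.sorted args (fun x => x) true
  match _hs : s with
  | [] => "N"   -- Python raises IndexError here (args[0] on empty); excluded by Pre_
  | highest :: rest =>
    if rest.length ≥ 2 then
      let b := PySem.List.pyGetD rest 0 0
      let c := PySem.List.pyGetD rest 1 0
      if b + c > highest then "S" else check_triangle_go rest
    else "N"
termination_by args.length
decreasing_by
  have h := PySem.List.length_sorted args (fun x : Int => x) true
  simp only [s] at _hs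
  rw [_hs] at h
  simp at h
  omega

def check_triangle (args : List Int) : String := check_triangle_go args

-- ===== PORT B =====
-- scan of zip(s, s[1:], s[2:]): consecutive triples of the sorted list
def check_triangle_scan : List Int → String
  | a :: b :: c :: t => if b + c > a then "S" else check_triangle_scan (b :: c :: t)
  | _ => "N"

def check_triangle_alt (args : List Int) : String :=
  check_triangle_scan (PySem.List.sorted args (fun x => x) true)

-- ===== PRECONDITION & SPEC =====
-- Pre_ excludes only the empty list, on which A raises IndexError (args[0]).
def Pre_check_triangle (args : List Int) : Prop := args ≠ []
instance (args : List Int) : Decidable (Pre_check_triangle args) := by unfold Pre_check_triangle; infer_instance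
def pvWitness_check_triangle : List Int := ([3, 4, 5])

def Spec_check_triangle (args : List Int) (out : String) : Prop := out = check_triangle_alt args
instance (args : List Int) (out : String) : Decidable (Spec_check_triangle args out) := by unfold Spec_check_triangle; infer_instance

-- ===== CLAIM (what is proved, stated in full; the proofs are below) =====
def Claim_equal_check_triangle : Prop := ∀ (args : List Int), Dom_check_triangle args → Pre_check_triangle args → Spec_check_triangle args (check_triangle args)

-- ===== LEMMAS AND PROOFS =====

-- the tail of a descending-sorted list is itself fixed by descending sort
lemma sorted_rev_tail_fix (args : List Int) (h0 : Int) (rest : List Int)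
    (hs : PySem.List.sorted args (fun x => x) true = h0 :: rest) :
    PySem.List.sorted rest (fun x => x) true = rest := by
  have hp : (PySem.List.sorted args (fun x => x) true).Pairwise
      (fun a b : Int => (fun x : Int => x) b ≤ (fun x : Int => x) a) :=
    PySem.List.sorted_pairwise_rev args (fun x : Int => x)
  rw [hs, List.pairwise_cons] at hp
  exact PySem.List.sorted_rev_eq_self_of_pairwise rest (fun x : Int => x) hp.2

-- A's loop on any list computes B's scan of the sorted list
lemma go_eq_scan (args : List Int) :
    check_triangle_go args = check_triangle_scan (PySem.List.sorted args (fun x => x) true) := by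
  induction hn : args.length using Nat.strong_induction_on generalizing args with
  | _ n ih =>
  subst hn
  rw [check_triangle_go]
  cases hs : PySem.List.sorted args (fun x => x) true with
  | nil => simp [check_triangle_scan]
  | cons h0 rest =>
    have hlen : rest.length + 1 = args.length := by
      have := PySem.List.length_sorted args (fun x : Int => x) true
      rw [hs] at this; simpa using this
    cases rest with
    | nil => simp [check_triangle_scan]
    | cons b t =>
      cases t with
      | nil => simp [check_triangle_scan]
      | cons c u =>
        simp only [List.length_cons, PySem.List.pyGetD]
        have hrec := ih (b :: c :: u).length (by omega) (b :: c :: u) rfl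
        rw [sorted_rev_tail_fix args h0 (b :: c :: u) hs] at hrec
        simp [check_triangle_scan, hrec]

-- ===== VERDICT (by name: the statement is the Claim_ definition above) =====
theorem check_triangle_spec : Claim_equal_check_triangle := by
  intro args _ _
  unfold Spec_check_triangle check_triangle check_triangle_alt
  exact go_eq_scan args
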